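-- pv_equiv track=rewrite | github.com/asmeurer/swe-bench-analysis | swebench_analyzer.py | check_text_for_username
-- ===== SOURCE A (Python) =====
-- def check_text_for_username(text, username):
--     """Check if username appears in text."""
--     if not text or not username:
--         return False
--
--     # Convert to lowercase for case-insensitive matching
--     text_lower = text.lower()
--     username_lower = username.lower()
--
--     # Common patterns for username mentions
--     patterns = [
--         f"@{username_lower}",  # @username mention
--         f"{username_lower}:",  # Username: (common in comments)
--         f"by {username_lower}",  # Attribution
--         f"from {username_lower}",  # Attribution
--         f"author: {username_lower}",  # Explicit authorship
--     ]
--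
--     for pattern in patterns:
--         if pattern in text_lower:
--             return True
--
--     return False
-- ===== SOURCE B (Python) =====
-- def check_text_for_username(text, username):
--     """Check if username appears in text."""
--     if not text or not username:
--         return False
--
--     t = text.lower()
--     u = username.lower()
--     m = len(u)
--
--     # One scan over the match positions of u, checking the surrounding context
--     for i in range(len(t)):
--         if t[i:i + m] != u:
--             continue
--         if t[i + m:i + m + 1] == ':':
--             return True
--         pre = t[:i]
--         if (pre.endswith('@') or pre.endswith('by ')
--                 or pre.endswith('from ') or pre.endswith('author: ')):
--             return True
--     return False
-- ===== Notes on version B (the rewrite author's own statement) =====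
-- stated objective: alternative
-- what changed: Instead of building five pattern strings and running five separate substring searches, B makes one left-to-right scan over the match positions of the lowercased username and checks the surrounding context (preceding '@'/'by '/'from '/'author: ' or a following ':') at each match.
import Mathlib
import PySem

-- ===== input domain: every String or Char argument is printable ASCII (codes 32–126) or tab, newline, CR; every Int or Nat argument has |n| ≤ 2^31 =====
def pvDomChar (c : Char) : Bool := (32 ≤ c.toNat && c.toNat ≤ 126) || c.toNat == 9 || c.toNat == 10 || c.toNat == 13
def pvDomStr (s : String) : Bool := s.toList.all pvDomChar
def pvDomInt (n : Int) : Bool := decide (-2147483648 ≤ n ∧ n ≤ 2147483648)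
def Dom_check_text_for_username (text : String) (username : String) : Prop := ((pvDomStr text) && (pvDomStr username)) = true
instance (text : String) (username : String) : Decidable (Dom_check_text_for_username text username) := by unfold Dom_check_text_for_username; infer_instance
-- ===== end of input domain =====

-- B replaces A's five separate substring searches by one scan over the match
-- positions of the username, checking the surrounding context at each match
-- (objective: alternative algorithm, same asymptotic cost).

-- ===== PORT A =====
def check_text_for_username (text : String) (username : String) : Bool :=
  -- if not text or not username: return False
  if text.toList = [] ∨ username.toList = [] then false
  else
    let text_lower := PySem.Chars.lower text.toList
    let username_lower := PySem.Chars.lower username.toList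
    -- the five f-string patterns, in order
    let patterns : List (List Char) :=
      [ '@' :: username_lower,
        username_lower ++ [':'],
        "by ".toList ++ username_lower,
        "from ".toList ++ username_lower,
        "author: ".toList ++ username_lower ]
    -- for pattern in patterns: if pattern in text_lower: return True / return False
    patterns.any (fun pattern => PySem.Chars.isIn pattern text_lower)

-- ===== PORT B =====
def check_text_for_username_alt (text : String) (username : String) : Bool :=
  if text.toList = [] ∨ username.toList = [] then false
  else
    let t := PySem.Chars.lower text.toList
    let u := PySem.Chars.lower username.toList
    let m := u.length
    -- for i in range(len(t)): … return True / return False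
    (List.range t.length).any (fun i =>
      -- t[i:i+m] != u : continue  (0 ≤ i ≤ len t, so the slice is (t.drop i).take m,
      -- exact by PySem.List.slice_natCast_add)
      if (t.drop i).take m ≠ u then false
      -- t[i+m:i+m+1] == ':'  (nonnegative bounds: exact as (t.drop (i+m)).take 1)
      else if (t.drop (i + m)).take 1 = [':'] then true
      else
        let pre := t.take i   -- t[:i]
        PySem.Chars.endswith pre "@".toList || PySem.Chars.endswith pre "by ".toList ||
          PySem.Chars.endswith pre "from ".toList || PySem.Chars.endswith pre "author: ".toList)

-- ===== PRECONDITION & SPEC =====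
def Spec_check_text_for_username (text : String) (username : String) (out : Bool) : Prop := out = check_text_for_username_alt text username
instance (text : String) (username : String) (out : Bool) : Decidable (Spec_check_text_for_username text username out) := by unfold Spec_check_text_for_username; infer_instance

-- ===== CLAIM (what is proved, stated in full; the proofs are below) =====
def Claim_equal_check_text_for_username : Prop := ∀ (text : String) (username : String), Dom_check_text_for_username text username → Spec_check_text_for_username text username (check_text_for_username text username)

-- ===== LEMMAS AND PROOFS =====

-- (a ++ b) is a prefix of l iff a is and b is a prefix of the rest
theorem pv_append_prefix_iff {α : Type} (a b l : List α) :
    (a ++ b) <+: l ↔ a <+: l ∧ b <+: l.drop a.length := by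
  constructor
  · rintro ⟨r, rfl⟩
    refine ⟨⟨b ++ r, by simp⟩, ?_⟩
    rw [List.append_assoc, List.drop_left]
    exact ⟨r, rfl⟩
  · rintro ⟨⟨r, rfl⟩, hb⟩
    rw [List.drop_left] at hb
    obtain ⟨s, rfl⟩ := hb
    exact ⟨s, by simp⟩

-- u is a prefix of l iff the length-u take of l equals u
theorem pv_prefix_iff_take {α : Type} (u l : List α) :
    u <+: l ↔ l.take u.length = u := by
  constructor
  · rintro ⟨r, rfl⟩; simp
  · intro h; exact h ▸ List.take_prefix _ _

-- a nonempty prefix of l.drop i forces i < l.length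
theorem pv_lt_length_of_prefix_drop {α : Type} {u l : List α} {i : ℕ}
    (hu : u ≠ []) (h : u <+: l.drop i) : i < l.length := by
  by_contra hlt
  rw [List.drop_eq_nil_of_le (by omega)] at h
  exact hu (List.prefix_nil.mp h)

-- occurrences of "p ++ u": u matches at some i with p just before it
theorem pv_infix_pre (p u t : List Char) (hu : u ≠ []) :
    (p ++ u) <:+: t ↔ ∃ i, i < t.length ∧ u <+: t.drop i ∧ p <:+ t.take i := by
  constructor
  · intro h
    obtain ⟨j, hj⟩ := (PySem.Chars.exists_prefix_drop_iff_isIn (p ++ u) t).mpr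
      ((PySem.Chars.isIn_iff_infix _ _).mpr h)
    rw [pv_append_prefix_iff] at hj
    obtain ⟨hp, hu'⟩ := hj
    rw [List.drop_drop] at hu'
    refine ⟨j + p.length, pv_lt_length_of_prefix_drop hu hu', hu', ?_⟩
    have : t.take (j + p.length) = t.take j ++ (t.drop j).take p.length := List.take_add ..
    rw [this, (pv_prefix_iff_take p (t.drop j)).mp hp]
    exact ⟨t.take j, rfl⟩
  · rintro ⟨i, hi, hu', ⟨s, hs⟩⟩
    rw [← (PySem.Chars.isIn_iff_infix _ _), ← PySem.Chars.exists_prefix_drop_iff_isIn]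
    refine ⟨s.length, ?_⟩
    have hlen : (t.take i).length = i := List.length_take_of_le (by omega)
    have hsl : s.length ≤ i := by
      have := congrArg List.length hs; simp at this; omega
    have hdrop : t.drop s.length = p ++ t.drop i := by
      conv_lhs => rw [← List.take_append_drop i t]
      rw [List.drop_append_of_le_length (by omega), ← hs, List.drop_left]
    rw [hdrop]
    obtain ⟨r, hr⟩ := hu'
    exact ⟨r, by rw [List.append_assoc, hr]⟩

-- occurrences of "u ++ [c]": u matches at some i with c just after it
theorem pv_infix_post (u t : List Char) (c : Char) (hu : u ≠ []) :
    (u ++ [c]) <:+: t ↔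
      ∃ i, i < t.length ∧ u <+: t.drop i ∧ (t.drop (i + u.length)).take 1 = [c] := by
  have key : ∀ i, (u ++ [c]) <+: t.drop i ↔
      u <+: t.drop i ∧ (t.drop (i + u.length)).take 1 = [c] := by
    intro i
    rw [pv_append_prefix_iff, List.drop_drop]
    simp [pv_prefix_iff_take]
  constructor
  · intro h
    obtain ⟨j, hj⟩ := (PySem.Chars.exists_prefix_drop_iff_isIn (u ++ [c]) t).mpr
      ((PySem.Chars.isIn_iff_infix _ _).mpr h)
    rw [key j] at hj
    exact ⟨j, pv_lt_length_of_prefix_drop hu hj.1, hj⟩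
  · rintro ⟨i, _, hcond⟩
    rw [← (PySem.Chars.isIn_iff_infix _ _), ← PySem.Chars.exists_prefix_drop_iff_isIn]
    exact ⟨i, (key i).mpr hcond⟩

-- ===== VERDICT (by name: the statement is the Claim_ definition above) =====
theorem check_text_for_username_spec : Claim_equal_check_text_for_username := by
  intro text username _
  unfold Spec_check_text_for_username check_text_for_username check_text_for_username_alt
  by_cases hempty : text.toList = [] ∨ username.toList = []
  · rw [if_pos hempty, if_pos hempty]
  · rw [if_neg hempty, if_neg hempty]
    rw [not_or] at hempty
    set t := PySem.Chars.lower text.toList with ht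
    set u := PySem.Chars.lower username.toList with hAu
    have hu : u ≠ [] := by
      simpa [hAu, PySem.Chars.lower] using hempty.2
    apply Bool.eq_iff_iff.mpr
    simp only [List.any_eq_true, List.mem_range, List.mem_cons, List.not_mem_nil, or_false]
    constructor
    · rintro ⟨p, hp, hin⟩
      rw [PySem.Chars.isIn_iff_infix] at hin
      rcases hp with rfl | rfl | rfl | rfl | rfl
      · -- '@' :: u  =  ['@'] ++ u
        obtain ⟨i, hi, hu', hsuf⟩ := (pv_infix_pre ['@'] u t hu).mp (by simpa using hin)
        refine ⟨i, hi, ?_⟩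
        rw [(pv_prefix_iff_take u (t.drop i)).mp hu']
        simp [PySem.Chars.endswith_iff, hsuf]
      · obtain ⟨i, hi, hu', hc⟩ := (pv_infix_post u t ':' hu).mp hin
        refine ⟨i, hi, ?_⟩
        rw [(pv_prefix_iff_take u (t.drop i)).mp hu']
        simp [hc]
      · obtain ⟨i, hi, hu', hsuf⟩ := (pv_infix_pre "by ".toList u t hu).mp hin
        refine ⟨i, hi, ?_⟩
        rw [(pv_prefix_iff_take u (t.drop i)).mp hu']
        have h' : ['b', 'y', ' '] <:+ List.take i t := hsuf
        simp [PySem.Chars.endswith_iff]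
        tauto
      · obtain ⟨i, hi, hu', hsuf⟩ := (pv_infix_pre "from ".toList u t hu).mp hin
        refine ⟨i, hi, ?_⟩
        rw [(pv_prefix_iff_take u (t.drop i)).mp hu']
        have h' : ['f', 'r', 'o', 'm', ' '] <:+ List.take i t := hsuf
        simp [PySem.Chars.endswith_iff]
        tauto
      · obtain ⟨i, hi, hu', hsuf⟩ := (pv_infix_pre "author: ".toList u t hu).mp hin
        refine ⟨i, hi, ?_⟩
        rw [(pv_prefix_iff_take u (t.drop i)).mp hu']
        have h' : ['a', 'u', 't', 'h', 'o', 'r', ':', ' '] <:+ List.take i t := hsuf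
        simp [PySem.Chars.endswith_iff]
        tauto
    · rintro ⟨i, hi, hcond⟩
      by_cases hmatch : (t.drop i).take u.length = u
      · have hu' : u <+: t.drop i := (pv_prefix_iff_take u (t.drop i)).mpr hmatch
        simp only [hmatch, ne_eq, not_true_eq_false, if_false] at hcond
        by_cases hcolon : (t.drop (i + u.length)).take 1 = [':']
        · refine ⟨u ++ [':'], by simp, ?_⟩
          rw [PySem.Chars.isIn_iff_infix]
          exact (pv_infix_post u t ':' hu).mpr ⟨i, hi, hu', hcolon⟩
        · simp only [hcolon, if_false, Bool.or_eq_true, PySem.Chars.endswith_iff] at hcond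
          rcases hcond with ((h | h) | h) | h
          · refine ⟨'@' :: u, by simp, ?_⟩
            rw [PySem.Chars.isIn_iff_infix]
            exact (pv_infix_pre ['@'] u t hu).mpr ⟨i, hi, hu', by simpa using h⟩
          · refine ⟨"by ".toList ++ u, by simp, ?_⟩
            rw [PySem.Chars.isIn_iff_infix]
            exact (pv_infix_pre "by ".toList u t hu).mpr ⟨i, hi, hu', h⟩
          · refine ⟨"from ".toList ++ u, by simp, ?_⟩
            rw [PySem.Chars.isIn_iff_infix]
            exact (pv_infix_pre "from ".toList u t hu).mpr ⟨i, hi, hu', h⟩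
          · refine ⟨"author: ".toList ++ u, by simp, ?_⟩
            rw [PySem.Chars.isIn_iff_infix]
            exact (pv_infix_pre "author: ".toList u t hu).mpr ⟨i, hi, hu', h⟩
      · simp [hmatch] at hcond
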